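-- pv_equiv track=rewrite | github.com/T-0n-1/prestudies-python-tasks | longest_string_in_list.py | longest_string
-- ===== SOURCE A (Python) =====
-- def longest_string(lst: list[str]) -> tuple[str, int]:
--     """
--     This function takes a list of strings as input and returns the longest string from the list.
--
--     :param lst: List of strings
--     :return: tuple with longest string and its length
--     """
--     longest = lst[0]
--     lenght = len(longest)
--     for string in lst:
--         if len(string) > lenght:
--             longest = string
--             lenght = len(longest)
--     return (longest, lenght)
-- ===== SOURCE B (Python) =====
-- def longest_string(lst: list[str]) -> tuple[str, int]:
--     """Sort-then-select: stable reverse sort by length, then take the first element."""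
--     ordered = sorted(lst, key=len, reverse=True)
--     longest = ordered[0]
--     return (longest, len(longest))
-- ===== Notes on version B (the rewrite author's own statement) =====
-- stated objective: alternative
-- what changed: Replaces the explicit running-max loop with a stable reverse sort by length followed by selecting the first element; stability preserves A's first-occurrence tie-breaking.
import Mathlib
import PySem

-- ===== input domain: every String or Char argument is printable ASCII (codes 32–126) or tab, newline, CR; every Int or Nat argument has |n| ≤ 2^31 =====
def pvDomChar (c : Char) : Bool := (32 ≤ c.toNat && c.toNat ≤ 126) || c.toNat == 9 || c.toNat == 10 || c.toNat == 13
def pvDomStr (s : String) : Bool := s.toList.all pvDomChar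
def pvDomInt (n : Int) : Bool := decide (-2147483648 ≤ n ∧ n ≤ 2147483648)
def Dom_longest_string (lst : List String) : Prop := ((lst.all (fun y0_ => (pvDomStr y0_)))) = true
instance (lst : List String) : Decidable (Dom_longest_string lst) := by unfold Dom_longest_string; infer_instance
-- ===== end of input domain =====

-- B replaces A's running-max loop with a stable reverse sort by length plus head selection (alternative decomposition, same result).


-- ===== PORT A =====
-- longest = lst[0]; lenght = len(longest); for string in lst: if len(string) > lenght: update
def longest_string (lst : List String) : String × Int :=
  let longest := PySem.List.pyGetD lst 0 ""
  let lenght := PySem.Str.len longest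
  lst.foldl (fun st s => if PySem.Str.len s > st.2 then (s, PySem.Str.len s) else st) (longest, lenght)

-- ===== PORT B =====
-- ordered = sorted(lst, key=len, reverse=True); longest = ordered[0]; return (longest, len(longest))
def longest_string_alt (lst : List String) : String × Int :=
  let ordered := PySem.List.sorted lst (fun s => PySem.Str.len s) true
  let longest := PySem.List.pyGetD ordered 0 ""
  (longest, PySem.Str.len longest)

-- ===== PRECONDITION & SPEC =====
-- Pre_ excludes only the empty list, where A raises IndexError (and B raises there too).
def Pre_longest_string (lst : List String) : Prop := lst ≠ []
instance (lst : List String) : Decidable (Pre_longest_string lst) := by unfold Pre_longest_string; infer_instance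
def pvWitness_longest_string : List String := (["ab", "c", "xyz"])
def Spec_longest_string (lst : List String) (out : String × Int) : Prop := out = longest_string_alt lst
instance (lst : List String) (out : String × Int) : Decidable (Spec_longest_string lst out) := by unfold Spec_longest_string; infer_instance

-- ===== CLAIM (what is proved, stated in full; the proofs are below) =====
def Claim_equal_longest_string : Prop := ∀ (lst : List String), Dom_longest_string lst → Pre_longest_string lst → Spec_longest_string lst (longest_string lst)

-- ===== LEMMAS AND PROOFS =====

-- Lockstep invariant: A's running-max fold state and B's insertion-sort accumulator
-- (whose head is the current first maximum) stay aligned over the same traversal.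
theorem pv_loop (t : List String) (m : String) (rest : List String) :
    ∃ m' rest',
      List.foldl (fun acc x =>
          PySem.List.insertBy (fun a b =>
            decide ((fun s => PySem.Str.len s) b < (fun s => PySem.Str.len s) a)) x acc)
        (m :: rest) t = m' :: rest' ∧
      List.foldl (fun st s => if PySem.Str.len s > st.2 then (s, PySem.Str.len s) else st)
        (m, PySem.Str.len m) t = (m', PySem.Str.len m') := by
  induction t generalizing m rest with
  | nil => exact ⟨m, rest, rfl, rfl⟩
  | cons x t ih =>
    simp only [List.foldl_cons, PySem.List.insertBy]
    by_cases h : m.length < x.length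
    · simpa [h, Nat.cast_lt, gt_iff_lt] using ih x (m :: rest)
    · simpa [h, Nat.cast_lt, gt_iff_lt] using ih m (PySem.List.insertBy (fun a b =>
        decide (PySem.Str.len b < PySem.Str.len a)) x rest)

-- ===== VERDICT (by name: the statement is the Claim_ definition above) =====
theorem longest_string_spec : Claim_equal_longest_string := by
  intro lst _ hpre
  unfold Spec_longest_string longest_string longest_string_alt
  cases lst with
  | nil => exact absurd rfl hpre
  | cons h t =>
    rw [PySem.List.sorted_rev_eq_foldl_insertBy]
    simp only [List.foldl_cons, PySem.List.insertBy, PySem.List.pyGetD_zero_cons,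
      gt_iff_lt, lt_irrefl, if_false]
    obtain ⟨m', rest', hb, ha⟩ := pv_loop t h []
    rw [hb, ha, PySem.List.pyGetD_zero_cons]
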